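-- pv_equiv track=rewrite | github.com/wconstab/algo | aoc/day5/solve_day5.py | solve_day_5_part_2
-- ===== SOURCE A (Python) =====
-- from string import ascii_lowercase
--
-- def react(a, b):
-- 	return a.lower() == b.lower() and a != b
--
-- def solve_day_5_part_1(input_str):
-- 	progress = True
-- 	input = list(input_str)
--
--
-- 	while progress:
-- 		progress = False
-- 		i = 0
-- 		while i < len(input) - 1:
-- 			if react(input[i], input[i+1]):
-- 				progress = True
-- 				input.pop(i)
-- 				input.pop(i)
-- 				# Heuristic: the reaction might have opened a new possibility one to the left
-- 				if i > 0:
-- 					i -= 1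
-- 			else:
-- 				i += 1
--
-- 	return "".join(input)
--
-- def solve_day_5_part_2(input_str):
-- 	answers = {}
-- 	min_length = 2**32
-- 	min_c = None
-- 	for c in ascii_lowercase:
-- 		modified_input = remove_char(input_str, c)
-- 		answer = solve_day_5_part_1(modified_input)
-- 		answers[c] = answer
-- 		if len(answer) < min_length:
-- 			min_length = len(answer)
-- 			min_c = c
-- 	return min_c, answers[min_c]
--
-- def remove_char(string, char):
-- 	return string.replace(char.lower(), "").replace(char.upper(), "")
-- ===== SOURCE B (Python) =====
-- from string import ascii_lowercase
--
-- def solve_day_5_part_2(input_str):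
--     best = None  # (best_c, best_stack)
--     for c in ascii_lowercase:
--         cu = c.upper()
--         stack = []
--         for ch in input_str:
--             if ch == c or ch == cu:
--                 continue  # the removed letter never enters the stack
--             if stack and stack[-1] != ch and stack[-1].lower() == ch.lower():
--                 stack.pop()  # reacts with the top of the stack
--             else:
--                 stack.append(ch)
--         if best is None or len(stack) < len(best[1]):
--             best = (c, stack)
--     best_c, stack = best
--     return best_c, "".join(stack)
-- ===== Notes on version B (the rewrite author's own statement) =====
-- stated objective: alternative
-- what changed: A fully reacts each candidate polymer by repeatedly scanning and popping adjacent reacting pairs until a whole pass makes no progress (worst-case quadratic passes with O(n) list.pop shifts); B fuses the letter removal into one left-to-right stack pass per letter that pops on reaction and pushes otherwise, giving the identical fully-reacted polymer in a single pass.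
import Mathlib
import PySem

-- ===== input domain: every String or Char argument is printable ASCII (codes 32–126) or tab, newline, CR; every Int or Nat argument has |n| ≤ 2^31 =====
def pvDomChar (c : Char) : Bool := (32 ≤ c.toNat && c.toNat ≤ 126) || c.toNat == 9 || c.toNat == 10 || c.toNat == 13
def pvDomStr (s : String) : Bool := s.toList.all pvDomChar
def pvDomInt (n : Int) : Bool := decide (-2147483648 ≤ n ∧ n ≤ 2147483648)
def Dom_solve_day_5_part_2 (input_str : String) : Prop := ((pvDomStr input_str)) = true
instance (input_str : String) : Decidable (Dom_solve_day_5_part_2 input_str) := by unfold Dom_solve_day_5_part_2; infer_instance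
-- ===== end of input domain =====

-- B replaces A's repeated pop-and-rescan polymer reduction (re-scanned until no progress,
-- for each of the 26 removed letters) by a single stack pass per removed letter; objective: alternative.


-- ===== PORT A =====

-- string.ascii_lowercase (module constant, used by both Pythons)
def ascii_lowercase : List Char :=
  ['a','b','c','d','e','f','g','h','i','j','k','l','m','n','o','p','q','r','s','t','u','v','w','x','y','z']

-- def react(a, b): return a.lower() == b.lower() and a != b   (a, b are 1-char strings)
def pyReact (a b : Char) : Bool :=
  (PySem.Chars.lowerChar a == PySem.Chars.lowerChar b) && (a != b)

-- fuel-based transcription of A's inner `while i < len(input) - 1` loop (fuel only makes the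
-- recursion structural; it is provably sufficient at every call site, so behaviour is A's)
def innerA : Nat → List Char → Nat → Bool → List Char × Bool
  | 0, input, _, progress => (input, progress)
  | fuel+1, input, i, progress =>
    if h : i < input.length - 1 then
      if pyReact (input[i]'(by omega)) (input[i+1]'(by omega)) then
        match PySem.List.pop? input (i : Int) with
        | some (_, rest1) =>
          match PySem.List.pop? rest1 (i : Int) with
          | some (_, rest2) => innerA fuel rest2 (if 0 < i then i - 1 else i) true
          | none => (rest1, true)
        | none => (input, progress)
      else innerA fuel input (i+1) progress
    else (input, progress)

-- A's outer `while progress` loop, same fuel discipline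
def outerA : Nat → List Char → Bool → List Char
  | 0, input, _ => input
  | fuel+1, input, progress =>
    if progress then
      let r := innerA (2 * input.length + 1) input 0 false
      outerA fuel r.1 r.2
    else input

-- def solve_day_5_part_1(input_str): … return "".join(input)  ("".join of 1-char strings)
def part1Str (input_str : String) : String :=
  String.ofList (outerA (input_str.toList.length + 2) input_str.toList true)

-- def remove_char(string, char): return string.replace(char.lower(), "").replace(char.upper(), "")
def removeChar (s : String) (c : Char) : String :=
  PySem.Str.replace
    (PySem.Str.replace s (String.singleton (PySem.Chars.lowerChar c)) "")
    (String.singleton (PySem.Chars.upperChar c)) ""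

-- body of A's `for c in ascii_lowercase` loop; state = (answers, min_length, min_c)
def part2Step (input_str : String)
    (st : PySem.Dict Char String × Int × Option Char) (c : Char) :
    PySem.Dict Char String × Int × Option Char :=
  let modified_input := removeChar input_str c
  let answer := part1Str modified_input
  let answers := st.1.insert c answer
  if PySem.Str.len answer < st.2.1 then (answers, PySem.Str.len answer, some c)
  else (answers, st.2.1, st.2.2)

-- return min_c, answers[min_c]
def finishA (st : PySem.Dict Char String × Int × Option Char) : String × String :=
  match st.2.2 with
  | some c => (String.singleton c, (st.1.get? c).getD "")  -- answers[min_c]; the key is present whenever min_c is set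
  | none => ("", "")  -- min_c is None: Python raises KeyError here; excluded by Pre_

def solve_day_5_part_2 (input_str : String) : String × String :=
  finishA (ascii_lowercase.foldl (part2Step input_str) (PySem.Dict.empty, 2 ^ 32, none))

-- ===== PORT B =====

-- one stack step: pop on reaction, else push (stack kept top-first; the Python appends at the end)
def reduceStep (stack : List Char) (ch : Char) : List Char :=
  match stack with
  | top :: rest =>
    if top != ch && (PySem.Chars.lowerChar top == PySem.Chars.lowerChar ch) then rest
    else ch :: top :: rest
  | [] => [ch]

-- loop body with the `continue` on the removed letter (cl/cu = the letter and its upper case)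
def reduceSkip (cl cu : Char) (stack : List Char) (ch : Char) : List Char :=
  if ch == cl || ch == cu then stack else reduceStep stack ch

-- body of B's `for c in ascii_lowercase` loop; best = None | (best_c, best stack)
def altStep (input_str : String) (best : Option (Char × List Char)) (c : Char) :
    Option (Char × List Char) :=
  let stack := input_str.toList.foldl (reduceSkip c (PySem.Chars.upperChar c)) []
  match best with
  | none => some (c, stack)
  | some (_, b) => if stack.length < b.length then some (c, stack) else best

-- return best_c, "".join(best)  (stack is top-first, so join its reverse)
def finishB (best : Option (Char × List Char)) : String × String :=
  match best with
  | some (c, stack) => (String.singleton c, String.ofList stack.reverse)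
  | none => ("", "")  -- unreachable: ascii_lowercase is nonempty

def solve_day_5_part_2_alt (input_str : String) : String × String :=
  finishB (ascii_lowercase.foldl (altStep input_str) none)

-- ===== PRECONDITION & SPEC =====
-- Pre_ excludes only strings holding at least 2^32 characters other than a/A (physically
-- infeasible multi-gigabyte inputs, none realizable in a test): only there can removing the letter a
-- leave an answer of length ≥ A's `min_length = 2**32` sentinel, so that min_c can stay None
-- and `answers[min_c]` raise KeyError. Wherever that answer is shorter than the sentinel,
-- min_c is set and A returns; Pre_ admits all such bounds-checkable inputs.
def Pre_solve_day_5_part_2 (input_str : String) : Prop :=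
  (input_str.toList.filter (fun ch => ch != 'a' && ch != 'A')).length < 2 ^ 32
instance (input_str : String) : Decidable (Pre_solve_day_5_part_2 input_str) := by
  unfold Pre_solve_day_5_part_2; infer_instance

def pvWitness_solve_day_5_part_2 : String := "bB"

def Spec_solve_day_5_part_2 (input_str : String) (out : String × String) : Prop := out = solve_day_5_part_2_alt input_str
instance (input_str : String) (out : String × String) : Decidable (Spec_solve_day_5_part_2 input_str out) := by unfold Spec_solve_day_5_part_2; infer_instance

-- ===== CLAIM (what is proved, stated in full; the proofs are below) =====
def Claim_equal_solve_day_5_part_2 : Prop := ∀ (input_str : String), Dom_solve_day_5_part_2 input_str → Pre_solve_day_5_part_2 input_str → Spec_solve_day_5_part_2 input_str (solve_day_5_part_2 input_str)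

-- ===== LEMMAS AND PROOFS =====

theorem char_toNat_inj {x y : Char} (h : x.toNat = y.toNat) : x = y := by
  have := congrArg Char.ofNat h
  rwa [Char.ofNat_toNat, Char.ofNat_toNat] at this

theorem toNat_lowerChar (c : Char) :
    (PySem.Chars.lowerChar c).toNat = if 65 ≤ c.toNat ∧ c.toNat ≤ 90 then c.toNat + 32 else c.toNat := by
  unfold PySem.Chars.lowerChar PySem.Chars.isupper
  rcases Decidable.em (65 ≤ c.toNat ∧ c.toNat ≤ 90) with h | h
  · have hA : 'A' ≤ c := by rw [Char.le_def]; exact h.1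
    have hZ : c ≤ 'Z' := by rw [Char.le_def]; exact h.2
    rw [if_pos h, if_pos (by simp [hA, hZ])]
    rw [Char.toNat_ofNat]
    have : (c.toNat + 32).isValidChar := by
      constructor; omega
    simp [this]
  · rw [if_neg h, if_neg ?_]
    simp only [Bool.and_eq_true, decide_eq_true_eq, not_and]
    intro hA hZ
    rw [Char.le_def] at hA hZ
    exact h ⟨hA, hZ⟩

theorem react_chain {x a b : Char} (h1 : pyReact x a = true) (h2 : pyReact a b = true) : x = b := by
  simp only [pyReact, Bool.and_eq_true, beq_iff_eq, bne_iff_ne, ne_eq] at h1 h2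
  obtain ⟨e1, n1⟩ := h1
  obtain ⟨e2, n2⟩ := h2
  have t1 := congrArg Char.toNat e1
  have t2 := congrArg Char.toNat e2
  rw [toNat_lowerChar, toNat_lowerChar] at t1 t2
  have n1' : x.toNat ≠ a.toNat := fun h => n1 (char_toNat_inj h)
  have n2' : a.toNat ≠ b.toNat := fun h => n2 (char_toNat_inj h)
  apply char_toNat_inj
  split_ifs at t1 t2 <;> omega

def Good (s : List Char) : Prop := List.IsChain (fun u v => pyReact v u = false) s

theorem reduceStep_react (x : Char) (r : List Char) (ch : Char) :
    reduceStep (x :: r) ch = if pyReact x ch then r else ch :: x :: r := by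
  simp only [reduceStep, pyReact, Bool.and_comm]

theorem step_good {s : List Char} (h : Good s) (ch : Char) : Good (reduceStep s ch) := by
  match s with
  | [] => exact List.IsChain.singleton ch
  | x :: r =>
    rw [reduceStep_react]
    by_cases hx : pyReact x ch = true
    · rw [if_pos hx]; exact h.tail
    · rw [if_neg hx]
      exact List.isChain_cons_cons.mpr ⟨by simpa using hx, h⟩

theorem step_cancel {s : List Char} (h : Good s) {a b : Char} (hr : pyReact a b = true) :
    reduceStep (reduceStep s a) b = s := by
  match s with
  | [] => rw [show reduceStep [] a = [a] from rfl, reduceStep_react, if_pos hr]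
  | x :: r =>
    rw [reduceStep_react]
    by_cases hx : pyReact x a = true
    · rw [if_pos hx]
      have hxb : x = b := react_chain hx hr
      subst hxb
      match r with
      | [] => simp [reduceStep]
      | y :: r' =>
        have hyx : pyReact y x = false := (List.isChain_cons_cons.mp h).1
        rw [reduceStep_react, if_neg (by simp [hyx])]
    · rw [if_neg hx, reduceStep_react, if_pos hr]

theorem foldl_cancel (pre : List Char) {s : List Char} (h : Good s) {a b : Char}
    (hr : pyReact a b = true) (post : List Char) :
    List.foldl reduceStep s (pre ++ a :: b :: post) = List.foldl reduceStep s (pre ++ post) := by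
  induction pre generalizing s with
  | nil => simp [List.foldl, step_cancel h hr]
  | cons p pre ih => simpa [List.foldl] using ih (step_good h p)

def NoPair (l : List Char) : Prop := List.IsChain (fun a b => pyReact a b = false) l

theorem foldl_noPair {s l : List Char} (h : Good s) (hn : NoPair l)
    (hh : ∀ x ∈ s.head?, ∀ y ∈ l.head?, pyReact x y = false) :
    List.foldl reduceStep s l = l.reverse ++ s := by
  induction l generalizing s with
  | nil => simp
  | cons a t ih =>
    have hstep : reduceStep s a = a :: s := by
      match s with
      | [] => rfl
      | x :: r =>
        have := hh x (by simp) a (by simp)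
        rw [reduceStep_react, if_neg (by simp [this])]
    rw [List.foldl_cons, hstep]
    have hgood : Good (a :: s) := by
      match s with
      | [] => exact List.IsChain.singleton a
      | x :: r => exact List.isChain_cons_cons.mpr ⟨hh x (by simp) a (by simp), h⟩
    rw [ih hgood ?_ ?_]
    · simp
    · exact hn.tail
    · intro x hx y hy
      simp at hx
      subst hx
      match t with
      | [] => simp at hy
      | b :: t' =>
        simp at hy; subst hy
        exact (List.isChain_cons_cons.mp hn).1

theorem erase2_eq (l : List Char) (i : Nat) (h : i + 1 < l.length) :
    (l.eraseIdx i).eraseIdx i = l.take i ++ l.drop (i+2) := by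
  rw [List.eraseIdx_eq_take_drop_succ, List.eraseIdx_eq_take_drop_succ]
  have hlen : (l.take i).length = i := by simp; omega
  rw [List.take_append_of_le_length (by omega), List.take_take,
      List.drop_append, hlen, List.drop_of_length_le (by omega), List.drop_drop]
  simp

theorem decomp_eq (l : List Char) (i : Nat) (h : i + 1 < l.length) :
    l = l.take i ++ (l[i]'(by omega)) :: (l[i+1]'h) :: l.drop (i+2) := by
  conv_lhs => rw [← List.take_append_drop i l]
  congr 1
  rw [← List.getElem_cons_drop (by omega : i < l.length)]
  congr 1
  rw [← List.getElem_cons_drop (by omega : i + 1 < l.length)]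

theorem red_erase2 {l : List Char} {i : Nat} (h : i + 1 < l.length)
    (hr : pyReact (l[i]'(by omega)) (l[i+1]'h) = true) :
    List.foldl reduceStep [] ((l.eraseIdx i).eraseIdx i) = List.foldl reduceStep [] l := by
  rw [erase2_eq l i h]
  conv_rhs => rw [decomp_eq l i h]
  exact (foldl_cancel (l.take i) List.IsChain.nil hr (l.drop (i+2))).symm

-- unfolding equations for the fuel transcription of the inner loop
theorem innerA_exit (fuel : Nat) (input : List Char) (i : Nat) (progress : Bool)
    (h : ¬ i < input.length - 1) :
    innerA (fuel+1) input i progress = (input, progress) := by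
  rw [innerA, dif_neg h]

theorem innerA_step_react (fuel : Nat) (input : List Char) (i : Nat) (progress : Bool)
    (h : i < input.length - 1) (hr : pyReact (input[i]'(by omega)) (input[i+1]'(by omega)) = true) :
    innerA (fuel+1) input i progress =
      innerA fuel ((input.eraseIdx i).eraseIdx i) (if 0 < i then i - 1 else i) true := by
  have h2 : i < (input.eraseIdx i).length := by
    rw [List.length_eraseIdx, if_pos (by omega)]; omega
  simp only [innerA, dif_pos h, if_pos hr,
    PySem.List.pop?_natCast input i (by omega),
    PySem.List.pop?_natCast (input.eraseIdx i) i h2]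

theorem innerA_step_noreact (fuel : Nat) (input : List Char) (i : Nat) (progress : Bool)
    (h : i < input.length - 1) (hr : ¬ pyReact (input[i]'(by omega)) (input[i+1]'(by omega)) = true) :
    innerA (fuel+1) input i progress = innerA fuel input (i+1) progress := by
  rw [innerA, dif_pos h, if_neg hr]

theorem innerA_len_le (fuel : Nat) : ∀ (input : List Char) (i : Nat) (progress : Bool),
    (innerA fuel input i progress).1.length ≤ input.length := by
  induction fuel with
  | zero => intro input i progress; exact le_rfl
  | succ fuel ih =>
    intro input i progress
    by_cases h : i < input.length - 1
    · by_cases hr : pyReact (input[i]'(by omega)) (input[i+1]'(by omega)) = true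
      · rw [innerA_step_react fuel input i progress h hr]
        refine (ih _ _ _).trans ?_
        have e1 : (input.eraseIdx i).length = input.length - 1 := by
          rw [List.length_eraseIdx, if_pos (by omega)]
        have e2 : ((input.eraseIdx i).eraseIdx i).length = (input.eraseIdx i).length - 1 := by
          rw [List.length_eraseIdx, if_pos (by omega)]
        omega
      · rw [innerA_step_noreact fuel input i progress h hr]
        exact ih _ _ _
    · rw [innerA_exit fuel input i progress h]

theorem innerA_mono (fuel : Nat) : ∀ (input : List Char) (i : Nat),
    (innerA fuel input i true).2 = true := by
  induction fuel with
  | zero => intro input i; rfl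
  | succ fuel ih =>
    intro input i
    by_cases h : i < input.length - 1
    · by_cases hr : pyReact (input[i]'(by omega)) (input[i+1]'(by omega)) = true
      · rw [innerA_step_react fuel input i true h hr]; exact ih _ _
      · rw [innerA_step_noreact fuel input i true h hr]; exact ih _ _
    · rw [innerA_exit fuel input i true h]

theorem innerA_snd_true (fuel : Nat) : ∀ (input : List Char) (i : Nat) (progress : Bool),
    (innerA fuel input i progress).2 = true →
    progress = true ∨ (innerA fuel input i progress).1.length < input.length := by
  induction fuel with
  | zero => intro input i progress hs; exact Or.inl hs
  | succ fuel ih =>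
    intro input i progress hs
    by_cases h : i < input.length - 1
    · by_cases hr : pyReact (input[i]'(by omega)) (input[i+1]'(by omega)) = true
      · rw [innerA_step_react fuel input i progress h hr] at hs ⊢
        right
        have hle := innerA_len_le fuel ((input.eraseIdx i).eraseIdx i) (if 0 < i then i - 1 else i) true
        have e1 : (input.eraseIdx i).length = input.length - 1 := by
          rw [List.length_eraseIdx, if_pos (by omega)]
        have e2 : ((input.eraseIdx i).eraseIdx i).length = (input.eraseIdx i).length - 1 := by
          rw [List.length_eraseIdx, if_pos (by omega)]
        omega
      · rw [innerA_step_noreact fuel input i progress h hr] at hs ⊢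
        exact ih _ _ _ hs
    · rw [innerA_exit fuel input i progress h] at hs ⊢
      exact Or.inl hs

theorem innerA_red (fuel : Nat) : ∀ (input : List Char) (i : Nat) (progress : Bool),
    List.foldl reduceStep [] (innerA fuel input i progress).1 = List.foldl reduceStep [] input := by
  induction fuel with
  | zero => intro input i progress; rfl
  | succ fuel ih =>
    intro input i progress
    by_cases h : i < input.length - 1
    · by_cases hr : pyReact (input[i]'(by omega)) (input[i+1]'(by omega)) = true
      · rw [innerA_step_react fuel input i progress h hr, ih]
        exact red_erase2 (by omega) hr
      · rw [innerA_step_noreact fuel input i progress h hr]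
        exact ih _ _ _
    · rw [innerA_exit fuel input i progress h]

theorem innerA_snd_false (fuel : Nat) : ∀ (input : List Char) (i : Nat) (progress : Bool),
    input.length ≤ fuel + i + 1 →
    (innerA fuel input i progress).2 = false →
    (innerA fuel input i progress).1 = input ∧ (innerA fuel input i progress).2 = progress ∧
      ∀ j, i ≤ j → ∀ (hj : j + 1 < input.length), pyReact (input[j]'(by omega)) (input[j+1]'hj) = false := by
  induction fuel with
  | zero =>
    intro input i progress hfuel hs
    exact ⟨rfl, rfl, fun j hij hj => by omega⟩
  | succ fuel ih =>
    intro input i progress hfuel hs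
    by_cases h : i < input.length - 1
    · by_cases hr : pyReact (input[i]'(by omega)) (input[i+1]'(by omega)) = true
      · rw [innerA_step_react fuel input i progress h hr] at hs
        rw [innerA_mono] at hs
        cases hs
      · rw [innerA_step_noreact fuel input i progress h hr] at hs ⊢
        obtain ⟨h1, h2, h3⟩ := ih input (i+1) progress (by omega) hs
        refine ⟨h1, h2, ?_⟩
        intro j hij hj
        rcases Nat.eq_or_lt_of_le hij with rfl | hlt
        · simpa using hr
        · exact h3 j (by omega) hj
    · rw [innerA_exit fuel input i progress h] at hs ⊢
      exact ⟨rfl, rfl, fun j hij hj => by omega⟩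

theorem foldl_len_le (s l : List Char) :
    (List.foldl reduceStep s l).length ≤ s.length + l.length := by
  induction l generalizing s with
  | nil => simp
  | cons x t ih =>
    have h := ih (reduceStep s x)
    have h2 : (reduceStep s x).length ≤ s.length + 1 := by
      match s with
      | [] => simp [reduceStep]
      | y :: r => rw [reduceStep_react]; split <;> simp <;> omega
    simp only [List.foldl_cons]
    simp at h2 ⊢
    omega

theorem outerA_red : ∀ (fuel : Nat) (l : List Char), l.length + 1 < fuel →
    outerA fuel l true = (List.foldl reduceStep [] l).reverse := by
  intro fuel
  induction fuel with
  | zero => intro l hl; omega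
  | succ fuel ih =>
    intro l hl
    rw [outerA]
    show outerA fuel (innerA (2 * l.length + 1) l 0 false).1
          (innerA (2 * l.length + 1) l 0 false).2 = _
    rcases hs : (innerA (2 * l.length + 1) l 0 false).2 with _|_
    · 
      obtain ⟨h1, -, h3⟩ := innerA_snd_false (2 * l.length + 1) l 0 false (by omega) hs
      rw [h1]
      obtain ⟨fuel, rfl⟩ : ∃ f, fuel = f + 1 := ⟨fuel - 1, by omega⟩
      show l = _
      have hnp : NoPair l := by
        rw [NoPair, List.isChain_iff_getElem]
        intro i hi
        exact h3 i (by omega) hi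
      rw [foldl_noPair List.IsChain.nil hnp (by simp)]
      simp
    · have hlt : (innerA (2 * l.length + 1) l 0 false).1.length < l.length := by
        rcases innerA_snd_true (2 * l.length + 1) l 0 false hs with hc | hc
        · cases hc
        · exact hc
      rw [ih _ (by omega), innerA_red]

theorem replace_go_single (c : Char) :
    ∀ (fuel : Nat) (l acc : List Char), l.length ≤ fuel →
    PySem.Chars.replace.go [c] [] fuel l acc = acc.reverse ++ l.filter (fun ch => ch != c) := by
  intro fuel
  induction fuel with
  | zero =>
    intro l acc hl
    have : l = [] := List.eq_nil_of_length_eq_zero (by omega)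
    subst this
    simp [PySem.Chars.replace.go]
  | succ fuel ih =>
    intro l acc hl
    match l with
    | [] => simp [PySem.Chars.replace.go]
    | ch :: t =>
      rw [PySem.Chars.replace.go]
      by_cases hc : ch = c
      · subst hc
        rw [if_pos (by simp [List.isPrefixOf])]
        rw [show PySem.Chars.replace.go [ch] [] fuel (List.drop [ch].length (ch :: t)) ([].reverse ++ acc)
              = PySem.Chars.replace.go [ch] [] fuel t acc from rfl]
        rw [ih t acc (by simpa using hl)]
        simp
      · rw [if_neg (by simp [List.isPrefixOf, Ne.symm hc])]
        rw [ih t (ch :: acc) (by simpa using hl)]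
        simp [hc]

theorem replace_single (s : List Char) (c : Char) :
    PySem.Chars.replace s [c] [] = s.filter (fun ch => ch != c) := by
  rw [PySem.Chars.replace]
  rw [if_neg (by simp)]
  exact replace_go_single c s.length s [] le_rfl

def stk (input_str : String) (c : Char) : List Char :=
  input_str.toList.foldl (reduceSkip c (PySem.Chars.upperChar c)) []

theorem stk_foldl (input_str : String) (c : Char) :
    stk input_str c =
      List.foldl reduceStep []
        (input_str.toList.filter (fun ch => ch != c && ch != PySem.Chars.upperChar c)) := by
  rw [stk]
  have : ∀ (st : List Char) (ch : Char),
      reduceSkip c (PySem.Chars.upperChar c) st ch =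
      if (ch != c && ch != PySem.Chars.upperChar c) then reduceStep st ch else st := by
    intro st ch
    rw [reduceSkip]
    by_cases hc : (ch == c || ch == PySem.Chars.upperChar c) = true
    · rw [if_pos hc, if_neg (by simp_all; tauto)]
    · rw [if_neg hc, if_pos (by simp_all)]
  rw [show reduceSkip c (PySem.Chars.upperChar c) =
        fun st ch => if (ch != c && ch != PySem.Chars.upperChar c) then reduceStep st ch else st
      from funext fun st => funext fun ch => this st ch]
  exact PySem.List.foldl_if_eq_foldl_filter _ _ _ _

theorem perLetter (input_str : String) (c : Char) (hc : PySem.Chars.lowerChar c = c) :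
    part1Str (removeChar input_str c) = String.ofList (stk input_str c).reverse := by
  have hmod : (removeChar input_str c).toList =
      input_str.toList.filter (fun ch => ch != c && ch != PySem.Chars.upperChar c) := by
    rw [removeChar]
    simp only [PySem.Str.replace, String.toList_ofList, String.toList_singleton]
    rw [show ("" : String).toList = [] from rfl]
    rw [replace_single, replace_single, List.filter_filter, hc]
    simp only [Bool.and_comm]
  rw [part1Str, hmod, outerA_red _ _ (by omega), ← stk_foldl]

-- invariant after the first ('a') step: both folds carry the same current best letter
def StateRel (input_str : String) (ls : List Char)
    (st : PySem.Dict Char String × Int × Option Char) (b : Option (Char × List Char)) : Prop :=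
  ∃ c0 s0, st.2.2 = some c0 ∧ b = some (c0, s0) ∧ s0 = stk input_str c0 ∧
    st.2.1 = (s0.length : Int) ∧ st.1.get? c0 = some (String.ofList s0.reverse) ∧ c0 ∉ ls

theorem stk_a_len_lt (input_str : String)
    (hpre : (input_str.toList.filter (fun ch => ch != 'a' && ch != 'A')).length < 2 ^ 32) :
    ((stk input_str 'a').length : Int) < 2 ^ 32 := by
  have h1 := foldl_len_le []
    (input_str.toList.filter (fun ch => ch != 'a' && ch != PySem.Chars.upperChar 'a'))
  rw [stk_foldl]
  rw [show PySem.Chars.upperChar 'a' = 'A' from rfl] at h1 ⊢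
  simp only [List.length_nil, Nat.zero_add] at h1
  push_cast
  omega

theorem fold_equiv (input_str : String) :
    ∀ (ls : List Char), (∀ c ∈ ls, PySem.Chars.lowerChar c = c) → ls.Nodup →
    ∀ st b, StateRel input_str ls st b →
    StateRel input_str [] (ls.foldl (part2Step input_str) st) (ls.foldl (altStep input_str) b) := by
  intro ls
  induction ls with
  | nil => intro _ _ st b h; exact h
  | cons c t ih =>
    intro hlow hnd st b hrel
    simp only [List.foldl_cons]
    apply ih (fun c' hc' => hlow c' (List.mem_cons_of_mem _ hc')) (List.Nodup.of_cons hnd)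
    have hans : part1Str (removeChar input_str c) = String.ofList (stk input_str c).reverse :=
      perLetter input_str c (hlow c (List.mem_cons_self ..))
    have hlen : PySem.Str.len (part1Str (removeChar input_str c)) = ((stk input_str c).length : Int) := by
      rw [hans, PySem.Str.len, String.toList_ofList, List.length_reverse]
    have hcnotin : c ∉ t := (List.nodup_cons.mp hnd).1
    obtain ⟨c0, s0, hmc, hb, hs0, hm, hget, hnotin⟩ := hrel
    have hne : c0 ≠ c := fun h => hnotin (h ▸ List.mem_cons_self ..)
    simp only [part2Step, altStep]
    simp only [hb]
    have hfold : List.foldl (reduceSkip c (PySem.Chars.upperChar c)) [] input_str.toList = stk input_str c := rfl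
    rw [hfold]
    by_cases hcmp : ((stk input_str c).length : Int) < (s0.length : Int)
    · rw [if_pos (by rw [hlen, hm]; exact hcmp), if_pos (by exact_mod_cast hcmp)]
      exact ⟨c, stk input_str c, rfl, rfl, rfl, hlen,
        by rw [hans, PySem.Dict.get?_insert_self], hcnotin⟩
    · rw [if_neg (by rw [hlen, hm]; exact hcmp),
          if_neg (show ¬((stk input_str c).length < s0.length) from
            fun h => hcmp (by exact_mod_cast h))]
      refine ⟨c0, s0, hmc, rfl, hs0, hm, ?_, fun h => hnotin (List.mem_cons_of_mem _ h)⟩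
      rw [PySem.Dict.get?_insert_of_ne _ _ hne, hget]

theorem extract_eq (input_str : String)
    (stA : PySem.Dict Char String × Int × Option Char) (stB : Option (Char × List Char))
    (h : StateRel input_str [] stA stB) :
    finishA stA = finishB stB := by
  rw [finishA.eq_def, finishB.eq_def]
  obtain ⟨d, m, mc⟩ := stA
  obtain ⟨c0, s0, hmc, hb, hs0, hm, hget, -⟩ := h
  simp only at hmc hb ⊢
  subst hmc; subst hb
  simp only [hget]
  rfl

set_option maxRecDepth 2048 in
theorem main_eq (input_str : String)
    (hpre : (input_str.toList.filter (fun ch => ch != 'a' && ch != 'A')).length < 2 ^ 32) :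
    solve_day_5_part_2 input_str = solve_day_5_part_2_alt input_str := by
  rw [solve_day_5_part_2, solve_day_5_part_2_alt]
  have hlower : ∀ c ∈ List.tail ascii_lowercase, PySem.Chars.lowerChar c = c := by
    simp only [ascii_lowercase, List.tail_cons, List.mem_cons, List.not_mem_nil, or_false]
    rintro c h
    rcases h with rfl|rfl|rfl|rfl|rfl|rfl|rfl|rfl|rfl|rfl|rfl|rfl|
      rfl|rfl|rfl|rfl|rfl|rfl|rfl|rfl|rfl|rfl|rfl|rfl|rfl <;> rfl
  have hnd : (List.tail ascii_lowercase).Nodup := by simp [ascii_lowercase]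
  have hnotin : 'a' ∉ List.tail ascii_lowercase := by simp [ascii_lowercase]
  -- peel the first ('a') iteration: A's min_length sentinel is beaten there (Pre_)
  rw [show ascii_lowercase = 'a' :: List.tail ascii_lowercase from rfl]
  simp only [List.foldl_cons]
  have hansA : part1Str (removeChar input_str 'a') = String.ofList (stk input_str 'a').reverse :=
    perLetter input_str 'a' rfl
  have hlenA : PySem.Str.len (part1Str (removeChar input_str 'a')) = ((stk input_str 'a').length : Int) := by
    rw [hansA, PySem.Str.len, String.toList_ofList, List.length_reverse]
  have hstep1 : part2Step input_str (PySem.Dict.empty, 2 ^ 32, none) 'a' =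
      (PySem.Dict.empty.insert 'a' (part1Str (removeChar input_str 'a')),
        ((stk input_str 'a').length : Int), some 'a') := by
    rw [part2Step]
    simp only
    rw [if_pos (by rw [hlenA]; exact stk_a_len_lt input_str hpre), hlenA]
  have hstep1' : altStep input_str none 'a' = some ('a', stk input_str 'a') := rfl
  rw [hstep1, hstep1']
  exact extract_eq input_str _ _
    (fold_equiv input_str (List.tail ascii_lowercase) hlower hnd _ _
      ⟨'a', stk input_str 'a', rfl, rfl, rfl, rfl,
        by rw [hansA, PySem.Dict.get?_insert_self], hnotin⟩)

-- ===== VERDICT (by name: the statement is the Claim_ definition above) =====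
theorem solve_day_5_part_2_spec : Claim_equal_solve_day_5_part_2 := by
  intro input_str _ hpre
  exact main_eq input_str hpre
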